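-- pv_equiv track=rewrite | github.com/mtw16-FSU/Advanced-Math-Calculator | MathCalculator/calculator/equations.py | parseTerms
-- ===== SOURCE A (Python) =====
-- def parseTerms(equation):
-- 	terms = []
-- 	currentTerm = ""
-- 	for i in range(0,len(equation)):
-- 		if isOperator(equation[i]):
-- 			if currentTerm == "":
-- 				terms.append(equation[i])
-- 			else:
-- 				terms.append(currentTerm)
-- 				terms.append(equation[i])
-- 			currentTerm = ""
-- 		else:
-- 			currentTerm += equation[i]
--
-- 	if currentTerm != "":
-- 		terms.append(currentTerm)
--
-- 	return terms
--
-- def isOperator(character):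
-- 	if not character.isdigit() and not character.isalpha():
-- 		return True
--
-- 	return False
-- ===== SOURCE B (Python) =====
-- def parseTerms(equation):
--     terms = []
--     i = 0
--     n = len(equation)
--     while i < n:
--         if isOperator(equation[i]):
--             terms.append(equation[i])
--             i += 1
--         else:
--             j = i + 1
--             while j < n and not isOperator(equation[j]):
--                 j += 1
--             terms.append(equation[i:j])
--             i = j
--     return terms
--
-- def isOperator(character):
--     return not (character.isdigit() or character.isalpha())
-- ===== Notes on version B (the rewrite author's own statement) =====
-- stated objective: alternative
-- what changed: Replaces the accumulate-into-currentTerm-and-flush character loop with a run-scanning pass: at each position it either emits the operator character or scans forward to the end of the non-operator run and emits that slice as one term.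
import Mathlib
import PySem

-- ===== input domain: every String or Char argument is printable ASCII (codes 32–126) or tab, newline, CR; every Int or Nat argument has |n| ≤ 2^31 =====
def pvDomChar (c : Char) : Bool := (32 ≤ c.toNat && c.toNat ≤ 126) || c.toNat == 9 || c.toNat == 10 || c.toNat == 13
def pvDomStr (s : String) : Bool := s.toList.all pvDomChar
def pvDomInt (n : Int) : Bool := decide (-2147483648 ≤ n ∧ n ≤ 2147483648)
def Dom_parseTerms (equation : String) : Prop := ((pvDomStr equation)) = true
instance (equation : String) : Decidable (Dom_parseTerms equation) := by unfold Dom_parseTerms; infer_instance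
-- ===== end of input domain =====

-- B tokenizes by scanning maximal non-operator runs instead of A's accumulate-and-flush loop; same output (alternative decomposition).

-- ===== PORT A =====
def isOperatorA (c : Char) : Bool :=
  if !PySem.Chars.isdigit c && !PySem.Chars.isalpha c then true else false

-- the for-loop of A: state = (terms, currentTerm)
def parseTermsGoA : List Char → List String → List Char → List String
  | [], terms, cur => if cur = [] then terms else terms ++ [String.ofList cur]
  | c :: rest, terms, cur =>
      if isOperatorA c then
        if cur = [] then parseTermsGoA rest (terms ++ [String.ofList [c]]) []
        else parseTermsGoA rest (terms ++ [String.ofList cur, String.ofList [c]]) []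
      else parseTermsGoA rest terms (cur ++ [c])

def parseTerms (equation : String) : List String :=
  parseTermsGoA equation.toList [] []

-- ===== PORT B =====
def isOperatorB (c : Char) : Bool :=
  !(PySem.Chars.isdigit c || PySem.Chars.isalpha c)

-- the while-loop of B: operator char → one token, else scan the run (inner while = takeWhile/dropWhile)
def parseTermsGoB : List Char → List String
  | [] => []
  | c :: rest =>
      if isOperatorB c then String.ofList [c] :: parseTermsGoB rest
      else String.ofList (c :: rest.takeWhile (fun x => !isOperatorB x)) ::
             parseTermsGoB (rest.dropWhile (fun x => !isOperatorB x))
termination_by l => l.length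
decreasing_by
  · simp
  · exact Nat.lt_succ_of_le (List.length_dropWhile_le _ _)

def parseTerms_alt (equation : String) : List String :=
  parseTermsGoB equation.toList

-- ===== PRECONDITION & SPEC =====
def Spec_parseTerms (equation : String) (out : List String) : Prop := out = parseTerms_alt equation
instance (equation : String) (out : List String) : Decidable (Spec_parseTerms equation out) := by unfold Spec_parseTerms; infer_instance

-- ===== CLAIM (what is proved, stated in full; the proofs are below) =====
def Claim_equal_parseTerms : Prop := ∀ (equation : String), Dom_parseTerms equation → Spec_parseTerms equation (parseTerms equation)

-- ===== LEMMAS AND PROOFS =====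

theorem isOp_eq (c : Char) : isOperatorA c = isOperatorB c := by
  simp [isOperatorA, isOperatorB]

-- A with the accumulator stripped
def auxA : List Char → List Char → List String
  | [], cur => if cur = [] then [] else [String.ofList cur]
  | c :: rest, cur =>
      if isOperatorA c then
        if cur = [] then String.ofList [c] :: auxA rest []
        else String.ofList cur :: String.ofList [c] :: auxA rest []
      else auxA rest (cur ++ [c])

theorem goA_eq_aux (l : List Char) : ∀ terms cur,
    parseTermsGoA l terms cur = terms ++ auxA l cur := by
  induction l with
  | nil => intro terms cur; by_cases h : cur = [] <;> simp [parseTermsGoA, auxA, h]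
  | cons c rest ih =>
      intro terms cur
      by_cases h : isOperatorA c
      · by_cases hc : cur = [] <;> simp [parseTermsGoA, auxA, h, hc, ih]
      · simp [parseTermsGoA, auxA, h, ih]

theorem aux_eq_goB (l : List Char) :
    auxA l [] = parseTermsGoB l ∧
    ∀ cur, cur ≠ [] →
      auxA l cur =
        String.ofList (cur ++ l.takeWhile (fun x => !isOperatorB x)) ::
          parseTermsGoB (l.dropWhile (fun x => !isOperatorB x)) := by
  induction l with
  | nil =>
      constructor
      · simp [auxA, parseTermsGoB]
      · intro cur hc; simp [auxA, parseTermsGoB, hc]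
  | cons c rest ih =>
      by_cases h : isOperatorA c
      · have hb : isOperatorB c = true := by rw [← isOp_eq]; exact h
        constructor
        · simp [auxA, parseTermsGoB, h, hb, ih.1]
        · intro cur hc
          simp [auxA, parseTermsGoB, h, hb, hc, List.takeWhile, List.dropWhile, ih.1]
      · have hb : isOperatorB c = false := by rw [← isOp_eq]; simpa using h
        constructor
        · have := ih.2 [c] (by simp)
          simp [auxA, parseTermsGoB, h, hb, this, List.takeWhile, List.dropWhile]
        · intro cur hc
          have := ih.2 (cur ++ [c]) (by simp)
          simp [auxA, parseTermsGoB, h, hb, this, List.takeWhile, List.dropWhile]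

-- ===== VERDICT (by name: the statement is the Claim_ definition above) =====
theorem parseTerms_spec : Claim_equal_parseTerms := by
  intro equation _
  unfold Spec_parseTerms parseTerms parseTerms_alt
  rw [goA_eq_aux, (aux_eq_goB equation.toList).1]
  simp
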